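-- pv_equiv track=rewrite | github.com/kh277/BOJ | 백준/Platinum/5419. 북서풍/북서풍.py | solve
-- ===== SOURCE A (Python) =====
-- def update(N, tree, index, value):
--     index += N
--     tree[index] += value
--
--     while index > 1:
--         index >>= 1
--         tree[index] = tree[index<<1] + tree[index<<1 | 1]
--
-- def query(N, tree, left, right):
--     result = 0
--     left += N
--     right += N
--
--     while left <= right:
--         if left & 1:
--             result += tree[left]
--             left += 1
--         if ~right & 1:
--             result += tree[right]
--             right -= 1
--
--         left >>= 1
--         right >>= 1
--
--     return result
--
-- def compress(N, point, value):
--     point.sort(key= lambda x: x[value])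
--     before = point[0][value]
--     compress = 0
--     for i in range(N):
--         if point[i][value] == before:
--             point[i][value] = compress
--         else:
--             before = point[i][value]
--             compress += 1
--             point[i][value] = compress
--
--     return point
--
-- def solve(N, point):
--     # x, y좌표 압축
--     point = compress(N, point, 0)
--     point = compress(N, point, 1)
--
--     # y좌표가 커지도록, x좌표가 작아지도록 정렬
--     point.sort(key= lambda x: (x[1], -x[0]))
--
--     # 세그먼트 트리 기본 설정
--     tree = [0 for _ in range(N*2)]
--
--     # y좌표가 작은 점들부터 세그먼트 트리에 추가 및 쿼리 처리
--     result = 0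
--     for i in range(N):
--         update(N, tree, point[i][0], 1)
--
--         # 자기 자신을 제외한 우하단 섬의 개수 누적
--         result += query(N, tree, point[i][0], N-1) - 1
--
--     return result
-- ===== SOURCE B (Python) =====
-- def compress(N, point, value):
--     point.sort(key= lambda x: x[value])
--     before = point[0][value]
--     compress = 0
--     for i in range(N):
--         if point[i][value] == before:
--             point[i][value] = compress
--         else:
--             before = point[i][value]
--             compress += 1
--             point[i][value] = compress
--
--     return point
--
-- def solve(N, point):
--     # same coordinate compression and (y, -x) sort as before
--     point = compress(N, point, 0)
--     point = compress(N, point, 1)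
--     point.sort(key= lambda x: (x[1], -x[0]))
--
--     # no tree at all: for each point, directly count the earlier points
--     # (smaller y, or equal y with larger-or-equal x) whose x is >= ours
--     result = 0
--     for i in range(N):
--         xi = point[i][0]
--         for j in range(i):
--             if point[j][0] >= xi:
--                 result += 1
--     return result
-- ===== Notes on version B (the rewrite author's own statement) =====
-- stated objective: simpler
-- what changed: B keeps the coordinate compression and the (y, -x) sort but deletes the whole iterative segment tree (update/query and the tree array), counting for each point the earlier points with x >= its x by a direct scan.
-- outside the precondition, e.g. on solve(2, [[9, 9, 3], [-2, 9, -2], [-2, -2, 2], [3, 2, -1], [-2, -2, 2]]): A returns 0, B returns 1; on solve(1, [[0, 0], [5, 5]]): A returns 0, B returns 0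
import Mathlib
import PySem

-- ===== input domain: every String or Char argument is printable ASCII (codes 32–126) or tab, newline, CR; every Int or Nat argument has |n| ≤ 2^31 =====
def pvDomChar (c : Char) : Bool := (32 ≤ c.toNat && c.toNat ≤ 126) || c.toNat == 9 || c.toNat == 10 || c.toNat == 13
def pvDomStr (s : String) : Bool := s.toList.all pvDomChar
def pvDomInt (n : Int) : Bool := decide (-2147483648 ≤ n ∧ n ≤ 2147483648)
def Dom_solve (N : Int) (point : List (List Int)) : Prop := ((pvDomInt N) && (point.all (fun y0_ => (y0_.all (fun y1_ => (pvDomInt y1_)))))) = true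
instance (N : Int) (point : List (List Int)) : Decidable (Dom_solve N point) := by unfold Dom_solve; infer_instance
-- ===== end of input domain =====

-- B replaces A's iterative segment tree (update/query over a 2N array) by a direct quadratic scan counting,
-- for each point, the earlier points (in the same (y, -x) order) whose x-coordinate is >= its own; the
-- coordinate compression and the sort are kept. Both Pythons mutate `point` in place (sort / coordinate
-- rewrite); the equivalence proved here is about the RETURN value only.

-- ===== PORT A =====

def updLoop (tree : List Int) (index : Int) : List Int :=
  if _h : 1 < index then
    updLoop (PySem.List.pySetD tree (index >>> (1 : Nat))
        (PySem.List.pyGetD tree ((index >>> (1 : Nat)) <<< (1 : Nat)) 0 +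
         PySem.List.pyGetD tree (PySem.Int.bor ((index >>> (1 : Nat)) <<< (1 : Nat)) 1) 0))
      (index >>> (1 : Nat))
  else tree
termination_by index.toNat
decreasing_by
  have : index >>> (1 : Nat) = index / 2 := by simp [Int.shiftRight_eq_div_pow]
  simp only [this]
  omega

def update (N : Int) (tree : List Int) (index value : Int) : List Int :=
  updLoop (PySem.List.pySetD tree (index + N) (PySem.List.pyGetD tree (index + N) 0 + value))
    (index + N)

def qryLoop (tree : List Int) (result left right : Int) : Nat → Int
  | 0 => result
  | fuel+1 =>
    if left ≤ right then
      qryLoop tree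
        ((if PySem.Int.band left 1 ≠ 0 then result + PySem.List.pyGetD tree left 0 else result) +
         (if PySem.Int.band (Int.not right) 1 ≠ 0 then PySem.List.pyGetD tree right 0 else 0))
        ((if PySem.Int.band left 1 ≠ 0 then left + 1 else left) >>> (1 : Nat))
        ((if PySem.Int.band (Int.not right) 1 ≠ 0 then right - 1 else right) >>> (1 : Nat))
        fuel
    else result

def query (N : Int) (tree : List Int) (left right : Int) : Int :=
  qryLoop tree 0 (left + N) (right + N) ((right + N) + 2).toNat

def compress (N : Int) (point : List (List Int)) (value : Int) : List (List Int) :=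
  let point := PySem.List.sorted point (fun x => PySem.List.pyGetD x value 0) false
  let before := PySem.List.pyGetD (PySem.List.pyGetD point 0 []) value 0
  ((PySem.List.pyRange 0 N 1).foldl
    (fun (st : List (List Int) × Int × Int) i =>
      if PySem.List.pyGetD (PySem.List.pyGetD st.1 i []) value 0 == st.2.1 then
        (PySem.List.pySetD st.1 i (PySem.List.pySetD (PySem.List.pyGetD st.1 i []) value st.2.2),
         st.2.1, st.2.2)
      else
        (PySem.List.pySetD st.1 i (PySem.List.pySetD (PySem.List.pyGetD st.1 i []) value (st.2.2 + 1)),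
         PySem.List.pyGetD (PySem.List.pyGetD st.1 i []) value 0, st.2.2 + 1))
    (point, before, 0)).1

def solve (N : Int) (point : List (List Int)) : Int :=
  let point := compress N point 0
  let point := compress N point 1
  let point := PySem.List.sorted2 point (fun x => PySem.List.pyGetD x 1 0)
      (fun x => -(PySem.List.pyGetD x 0 0)) false
  let tree := (PySem.List.pyRange 0 (N*2) 1).map (fun _ => (0 : Int))
  ((PySem.List.pyRange 0 N 1).foldl
    (fun (st : List Int × Int) i =>
      let x := PySem.List.pyGetD (PySem.List.pyGetD point i []) 0 0
      let tree := update N st.1 x 1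
      (tree, st.2 + query N tree x (N-1) - 1))
    (tree, 0)).2

-- ===== PORT B =====

def solve_alt (N : Int) (point : List (List Int)) : Int :=
  let point := compress N point 0
  let point := compress N point 1
  let point := PySem.List.sorted2 point (fun x => PySem.List.pyGetD x 1 0)
      (fun x => -(PySem.List.pyGetD x 0 0)) false
  (PySem.List.pyRange 0 N 1).foldl
    (fun (result : Int) i =>
      let xi := PySem.List.pyGetD (PySem.List.pyGetD point i []) 0 0
      (PySem.List.pyRange 0 i 1).foldl
        (fun r j => if PySem.List.pyGetD (PySem.List.pyGetD point j []) 0 0 ≥ xi then r + 1 else r)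
        result)
    0

-- ===== PRECONDITION & SPEC =====

-- Pre_ is the natural domain of the BOJ task (N is the number of points, every point has at least two
-- coordinates) plus the trivial N ≤ 0 region where both programs return 0 without looking at the tree.
-- Outside it A raises IndexError on almost every input (empty list, short rows, N > len(point),
-- out-of-range tree indexing when 0 < N < len(point)); the mismatched inputs 0 < N < len(point) on which
-- A happens to return (only a prefix of the points is compressed and counted) are excluded as malformed input.
def Pre_solve (N : Int) (point : List (List Int)) : Prop :=
  (N = (point.length : Int) ∨ N ≤ 0) ∧ point ≠ [] ∧ ∀ row ∈ point, 2 ≤ row.length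
instance (N : Int) (point : List (List Int)) : Decidable (Pre_solve N point) := by
  unfold Pre_solve; infer_instance

def pvWitness_solve : Int × List (List Int) := (3, [[5, 2], [1, 7], [4, 4]])

def Spec_solve (N : Int) (point : List (List Int)) (out : Int) : Prop := out = solve_alt N point
instance (N : Int) (point : List (List Int)) (out : Int) : Decidable (Spec_solve N point out) := by
  unfold Spec_solve; infer_instance

-- ===== CLAIM (what is proved, stated in full; the proofs are below) =====
def Claim_equal_solve : Prop := ∀ (N : Int) (point : List (List Int)),
  Dom_solve N point → Pre_solve N point → Spec_solve N point (solve N point)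

-- ===== LEMMAS AND PROOFS =====

theorem int_shiftR1 (l : Int) : l >>> (1 : Nat) = l / 2 := by
  simp [Int.shiftRight_eq_div_pow]

theorem int_shiftL1 (l : Int) : l <<< (1 : Nat) = 2 * l := by
  rw [Int.shiftLeft_eq]; ring

theorem nat_two_mul_or_one (m : Nat) : 2*m ||| 1 = 2*m+1 := by
  apply Nat.eq_of_testBit_eq
  intro i
  rw [Nat.testBit_or]
  cases i with
  | zero => simp [Nat.testBit_zero]
  | succ j =>
      rw [Nat.testBit_succ, Nat.testBit_succ, Nat.testBit_succ]
      have h1 : (2*m+1)/2 = m := by omega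
      have h2 : (2*m)/2 = m := by omega
      have h3 : (1:Nat)/2 = 0 := by omega
      simp [h1, h2, h3]

theorem int_bor_two_mul_one (m : Int) (h : 0 ≤ m) : PySem.Int.bor (2*m) 1 = 2*m+1 := by
  rw [PySem.Int.bor_of_nonneg (by omega) (by omega)]
  have : (2*m).toNat = 2 * m.toNat := by omega
  rw [this]
  show ((2 * m.toNat ||| 1 : Nat) : Int) = _
  rw [nat_two_mul_or_one]
  omega

theorem int_not_eq (r : Int) : Int.not r = -r-1 := by
  cases r with
  | ofNat n => show Int.negSucc n = _ ; rw [Int.negSucc_eq] ; simp [Int.ofNat_eq_natCast] ; ring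
  | negSucc n => show (n : Int) = _ ; rw [Int.negSucc_eq] ; ring

theorem int_band_one' (l : Int) : PySem.Int.band l 1 = l % 2 := by
  rw [PySem.Int.band_one, PySem.Int.mod_eq_emod_of_pos (by omega)]

theorem pyGetD_toNat (xs : List Int) (i : Int) (h : 0 ≤ i) :
    PySem.List.pyGetD xs i 0 = xs.getD i.toNat 0 := by
  conv_lhs => rw [show i = ((i.toNat : Nat) : Int) by omega]
  rw [PySem.List.pyGetD_natCast]

theorem pySetD_toNat (xs : List Int) (i : Int) (v : Int) (h : 0 ≤ i) :
    PySem.List.pySetD xs i v = xs.set i.toNat v := PySem.List.pySetD_of_nonneg xs v h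

def isAnc (m j : Nat) : Bool :=
  if j ≤ m then j == m else isAnc m (j / 2)
termination_by j
decreasing_by omega

theorem isAnc_self (m : Nat) : isAnc m m = true := by unfold isAnc; simp

theorem isAnc_of_lt {m j : Nat} (h : j < m) : isAnc m j = false := by
  unfold isAnc; simp [Nat.le_of_lt h]; omega

theorem isAnc_div2 {m j : Nat} (h : m < j) : isAnc m j = isAnc m (j / 2) := by
  conv_lhs => unfold isAnc
  simp [Nat.not_le.mpr h]

theorem isAnc_iff {m j : Nat} : isAnc m j = true ↔ ∃ k, j / 2^k = m := by
  induction j using Nat.strong_induction_on with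
  | _ j ih =>
    by_cases h : j ≤ m
    · unfold isAnc
      simp [h]
      constructor
      · rintro rfl; exact ⟨0, by simp⟩
      · rintro ⟨k, hk⟩
        have : j / 2^k ≤ j := Nat.div_le_self _ _
        omega
    · rw [isAnc_div2 (by omega)]
      rw [ih (j/2) (by omega)]
      constructor
      · rintro ⟨k, hk⟩
        exact ⟨k+1, by rw [pow_succ, Nat.mul_comm, ← Nat.div_div_eq_div_mul]; exact hk⟩
      · rintro ⟨k, hk⟩
        cases k with
        | zero => simp at hk; omega
        | succ k =>
          refine ⟨k, ?_⟩
          rw [← hk, pow_succ, Nat.mul_comm, ← Nat.div_div_eq_div_mul]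

theorem isAnc_parent {m j : Nat} (h : isAnc m j = true) : isAnc (m / 2) j = true := by
  rw [isAnc_iff] at h ⊢
  obtain ⟨k, hk⟩ := h
  exact ⟨k+1, by rw [pow_succ, ← Nat.div_div_eq_div_mul, hk]⟩

theorem isAnc_leaf {n m j : Nat} (hm1 : n ≤ m) (hm2 : m < 2*n) (hj1 : n ≤ j) (hj2 : j < 2*n) :
    isAnc m j = true ↔ j = m := by
  by_cases h : j ≤ m
  · unfold isAnc; simp [h]
  · rw [isAnc_div2 (by omega), isAnc_of_lt (by omega)]
    simp; omega

theorem isAnc_split {m j : Nat} (hm : 1 ≤ m) (hj : m < j) :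
    isAnc m j = (isAnc (2*m) j || isAnc (2*m+1) j) := by
  induction j using Nat.strong_induction_on with
  | _ j ih =>
    rcases Nat.lt_or_ge j (2*m) with h1 | h1
    · -- m < j < 2m : all three false
      rw [isAnc_div2 hj, isAnc_of_lt (by omega), isAnc_of_lt (by omega), isAnc_of_lt (by omega)]
      simp
    · rcases Nat.eq_or_lt_of_le h1 with h2 | h2
      · rw [← h2, isAnc_div2 (show m < 2*m by omega)]
        have e : 2*m/2 = m := by omega
        rw [e, isAnc_self, isAnc_self]
        simp
      · rcases Nat.eq_or_lt_of_le h2 with h3 | h3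
        · -- j = 2m+1
          have h3' : j = 2*m+1 := by omega
          rw [h3', isAnc_div2 (show m < 2*m+1 by omega)]
          have e : (2*m+1)/2 = m := by omega
          rw [e, isAnc_self, isAnc_self]
          simp
        · -- j > 2m+1
          rw [isAnc_div2 hj, isAnc_div2 (show 2*m < j by omega), isAnc_div2 (show 2*m+1 < j by omega)]
          exact ih (j/2) (by omega) (by omega)

theorem isAnc_not_both {m j : Nat} (hm : 1 ≤ m) :
    ¬(isAnc (2*m) j = true ∧ isAnc (2*m+1) j = true) := by
  induction j using Nat.strong_induction_on with
  | _ j ih =>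
    rintro ⟨h1, h2⟩
    rcases Nat.lt_or_ge j (2*m) with c | c
    · rw [isAnc_of_lt c] at h1; exact absurd h1 (by simp)
    · rcases Nat.eq_or_lt_of_le c with c2 | c2
      · rw [show j = 2*m by omega, isAnc_of_lt (by omega)] at h2
        exact absurd h2 (by simp)
      · rcases Nat.eq_or_lt_of_le c2 with c3 | c3
        · rw [show j = 2*m+1 by omega, isAnc_div2 (by omega)] at h1
          have e : (2*m+1)/2 = m := by omega
          rw [e, isAnc_of_lt (by omega)] at h1
          exact absurd h1 (by simp)
        · rw [isAnc_div2 (by omega)] at h1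
          rw [isAnc_div2 (by omega)] at h2
          exact ih (j/2) (by omega) ⟨h1, h2⟩

theorem isAnc_chain {a b j : Nat} (ha : isAnc a j = true) (hb : isAnc b j = true)
    (hab : a < b) : isAnc a (b / 2) = true := by
  rw [isAnc_iff] at ha hb ⊢
  obtain ⟨k1, hk1⟩ := ha
  obtain ⟨k2, hk2⟩ := hb
  have hkk : k2 < k1 := by
    by_contra hc
    have hc' : k1 ≤ k2 := by omega
    have : j / 2^k2 = j / 2^k1 / 2^(k2-k1) := by
      rw [Nat.div_div_eq_div_mul, ← pow_add, show k1 + (k2-k1) = k2 by omega]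
    rw [this, hk1] at hk2
    have : a / 2^(k2-k1) ≤ a := Nat.div_le_self _ _
    omega
  refine ⟨k1 - k2 - 1, ?_⟩
  have e1 : j / 2^k1 = j / 2^k2 / 2 / 2^(k1-k2-1) := by
    rw [Nat.div_div_eq_div_mul, Nat.div_div_eq_div_mul, ← pow_succ', ← pow_add,
      show k2 + (k1-k2-1+1) = k1 by omega]
  rw [e1, hk2] at hk1
  exact hk1

def Sleaf (c : List Int) (n m : Nat) : Int :=
  ∑ j ∈ Finset.range n, (if isAnc m (j+n) then c.getD j 0 else 0)

def SI (c : List Int) (n a b : Nat) : Int := ∑ m ∈ Finset.Icc a b, Sleaf c n m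

theorem Sleaf_leaf {c : List Int} {n m : Nat} (hm1 : n ≤ m) (hm2 : m < 2*n) :
    Sleaf c n m = c.getD (m - n) 0 := by
  unfold Sleaf
  have hcg : ∀ j ∈ Finset.range n,
      (if isAnc m (j+n) then c.getD j 0 else 0) = (if j = m - n then c.getD j 0 else 0) := by
    intro j hj
    simp only [Finset.mem_range] at hj
    have hiff := isAnc_leaf (n := n) (m := m) (j := j+n) hm1 hm2 (by omega) (by omega)
    by_cases h : isAnc m (j+n) = true
    · rw [if_pos h]
      rw [hiff] at h
      rw [if_pos (by omega)]
    · rw [if_neg h, if_neg (by rw [hiff] at h; omega)]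
  rw [Finset.sum_congr rfl hcg, Finset.sum_ite_eq' (Finset.range n) (m - n) (fun j => c.getD j 0)]
  rw [if_pos (by rw [Finset.mem_range]; omega)]

theorem Sleaf_split {c : List Int} {n m : Nat} (hm1 : 1 ≤ m) (hm2 : m < n) :
    Sleaf c n m = Sleaf c n (2*m) + Sleaf c n (2*m+1) := by
  unfold Sleaf
  rw [← Finset.sum_add_distrib]
  apply Finset.sum_congr rfl
  intro j hj
  simp only [Finset.mem_range] at hj
  have hsp := isAnc_split (m := m) (j := j+n) hm1 (by omega)
  have hnb := isAnc_not_both (m := m) (j := j+n) hm1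
  rw [hsp]
  by_cases h1 : isAnc (2*m) (j+n) = true
  · have h2 : isAnc (2*m+1) (j+n) = false := by
      cases hh : isAnc (2*m+1) (j+n)
      · rfl
      · exact absurd ⟨h1, hh⟩ hnb
    rw [h1, h2]; simp
  · have h1' : isAnc (2*m) (j+n) = false := by simpa using h1
    rw [h1']; simp

theorem Icc_insert_bot' {a b : Nat} (h : a ≤ b) :
    Finset.Icc a b = insert a (Finset.Icc (a+1) b) := by
  ext x; simp only [Finset.mem_Icc, Finset.mem_insert]; omega

theorem Icc_insert_top {a b : Nat} (h : a ≤ b) :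
    Finset.Icc a b = insert b (Finset.Icc a (b-1)) := by
  ext x; simp only [Finset.mem_Icc, Finset.mem_insert]; omega

theorem SI_bot {c : List Int} {n a b : Nat} (h : a ≤ b) :
    SI c n a b = Sleaf c n a + SI c n (a+1) b := by
  unfold SI
  rw [Icc_insert_bot' h, Finset.sum_insert (by simp only [Finset.mem_Icc]; omega)]

theorem SI_top {c : List Int} {n a b : Nat} (h : a ≤ b) (hb : 1 ≤ b) :
    SI c n a b = SI c n a (b-1) + Sleaf c n b := by
  unfold SI
  rw [Icc_insert_top h, Finset.sum_insert (by simp only [Finset.mem_Icc]; omega)]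
  ring

theorem SI_empty {c : List Int} {n a b : Nat} (h : b < a) : SI c n a b = 0 := by
  unfold SI
  rw [Finset.Icc_eq_empty (by omega)]
  simp

theorem SI_pair {c : List Int} {n : Nat} (a b : Nat) (ha : 1 ≤ a) (hb : b < n) :
    SI c n (2*a) (2*b+1) = SI c n a b := by
  induction b with
  | zero => rw [SI_empty (by omega), SI_empty (by omega)]
  | succ b ih =>
    rcases Nat.lt_or_ge (b+1) a with h | h
    · rw [SI_empty (by omega), SI_empty (by omega)]
    · rw [SI_top (a := 2*a) (b := 2*(b+1)+1) (by omega) (by omega)]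
      rw [show 2*(b+1)+1-1 = 2*(b+1) by omega]
      rw [SI_top (a := 2*a) (b := 2*(b+1)) (by omega) (by omega)]
      rw [show 2*(b+1)-1 = 2*b+1 by omega]
      rw [ih (by omega)]
      rw [SI_top (a := a) (b := b+1) (by omega) (by omega)]
      rw [show b+1-1 = b by omega]
      rw [Sleaf_split (m := b+1) (by omega) (by omega)]
      ring_nf

def goodTree (n : Nat) (tree c : List Int) : Prop :=
  tree.length = 2*n ∧ c.length = n ∧
  (∀ j < n, tree.getD (n+j) 0 = c.getD j 0) ∧
  (∀ m, 1 ≤ m → m < n → tree.getD m 0 = tree.getD (2*m) 0 + tree.getD (2*m+1) 0)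

theorem goodTree_getD {n : Nat} {tree c : List Int} (hg : goodTree n tree c)
    {m : Nat} (h1 : 1 ≤ m) (h2 : m < 2*n) : tree.getD m 0 = Sleaf c n m := by
  obtain ⟨hlt, hlc, hleaf, hint⟩ := hg
  have aux : ∀ d m, 1 ≤ m → m < 2*n → 2*n - m ≤ d → tree.getD m 0 = Sleaf c n m := by
    intro d
    induction d with
    | zero => intro m hm1 hm2 hm3; omega
    | succ d ih =>
      intro m hm1 hm2 hm3
      rcases Nat.lt_or_ge m n with hmn | hmn
      · rw [hint m hm1 hmn, ih (2*m) (by omega) (by omega) (by omega),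
          ih (2*m+1) (by omega) (by omega) (by omega), ← Sleaf_split hm1 hmn]
      · rw [show m = n + (m - n) by omega] at hm2 ⊢
        rw [hleaf (m - n) (by omega), Sleaf_leaf (by omega) (by omega)]
        congr 1
        omega
  exact aux (2*n) m h1 h2 (by omega)

theorem getD_set (c : List Int) (k : Nat) (v : Int) (j : Nat) :
    (c.set k v).getD j 0 = if j = k ∧ k < c.length then v else c.getD j 0 := by
  rw [List.getD_eq_getElem?_getD, List.getD_eq_getElem?_getD, List.getElem?_set]
  split_ifs with h1 h2 h3 h4 <;> simp_all <;> omega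

theorem getD_set' {α : Type} (c : List α) (k : Nat) (v : α) (j : Nat) (d : α) :
    (c.set k v).getD j d = if j = k ∧ k < c.length then v else c.getD j d := by
  rw [List.getD_eq_getElem?_getD, List.getD_eq_getElem?_getD, List.getElem?_set]
  split_ifs with h1 h2 h3 h4 <;> simp_all <;> omega

theorem updLoop_inv {n L : Nat} {c' : List Int}
    (hL1 : n ≤ L) (hL2 : L < 2*n) (hn : 1 ≤ n) (hc : c'.length = n) (hLa : isAnc L L = true) :
    ∀ d : Nat, ∀ i : Int, ∀ tree : List Int,
      i.toNat ≤ d → 1 ≤ i → i.toNat < 2*n → isAnc i.toNat L = true →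
      tree.length = 2*n →
      (∀ j < n, tree.getD (n+j) 0 = c'.getD j 0) →
      (∀ m, 1 ≤ m → m < n → (isAnc m L = false ∨ i.toNat ≤ m) →
        tree.getD m 0 = tree.getD (2*m) 0 + tree.getD (2*m+1) 0) →
      goodTree n (updLoop tree i) c' := by
  intro d
  induction d with
  | zero => intro i tree hd h1 _ _ _ _ _; omega
  | succ d ih =>
    intro i tree hd h1 h2n hanc hlen hleaf hint
    rw [updLoop]
    by_cases hgt : 1 < i
    · rw [dif_pos hgt]
      have hi2 : i >>> (1:Nat) = i / 2 := int_shiftR1 i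
      have hI2 : (i >>> (1:Nat)).toNat = i.toNat / 2 := by rw [hi2]; omega
      have hsl : (i >>> (1:Nat)) <<< (1:Nat) = 2 * (i >>> (1:Nat)) := int_shiftL1 _
      have hi2nn : 0 ≤ i >>> (1:Nat) := by rw [hi2]; omega
      have hbor : PySem.Int.bor ((i >>> (1:Nat)) <<< (1:Nat)) 1 = 2 * (i >>> (1:Nat)) + 1 := by
        rw [hsl]; exact int_bor_two_mul_one _ hi2nn
      set I := i.toNat with hI
      have hI2n : I / 2 < n := by omega
      have hI21 : 1 ≤ I / 2 := by omega
      -- the new tree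
      rw [hbor, hsl,
        pyGetD_toNat _ _ (by omega), pyGetD_toNat _ _ (by omega),
        pySetD_toNat _ _ _ hi2nn]
      have h2a : (2 * (i >>> (1:Nat))).toNat = 2 * (I/2) := by rw [hi2]; omega
      have h2b : (2 * (i >>> (1:Nat)) + 1).toNat = 2 * (I/2) + 1 := by rw [hi2]; omega
      rw [h2a, h2b, hI2]
      set v := tree.getD (2*(I/2)) 0 + tree.getD (2*(I/2)+1) 0 with hv
      set t1 := tree.set (I/2) v with ht1
      have hlen1 : t1.length = 2*n := by rw [ht1, List.length_set]; exact hlen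
      have hgetD : ∀ j : Nat, t1.getD j 0 = if j = I/2 then v else tree.getD j 0 := by
        intro j
        rw [ht1, getD_set]
        by_cases hj : j = I/2
        · rw [if_pos ⟨hj, by omega⟩, if_pos hj]
        · rw [if_neg (by tauto), if_neg hj]
      apply ih (i >>> (1:Nat)) t1
      · omega
      · rw [hi2]; omega
      · omega
      · rw [hI2]; exact isAnc_parent hanc
      · exact hlen1
      · intro j hj
        rw [hgetD, if_neg (by omega)]
        exact hleaf j hj
      · intro m hm1 hmn hcond
        rw [hI2] at hcond
        by_cases hmI2 : m = I/2
        · subst hmI2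
          rw [hgetD, if_pos rfl, hgetD, if_neg (by omega), hgetD, if_neg (by omega)]
        · rw [hgetD, if_neg hmI2, hgetD, hgetD]
          have hch1 : ¬(2*m = I/2) := by
            intro hch
            have hpar : isAnc m L = true := by
              have h2 : isAnc (I/2/2) L = true := isAnc_parent (isAnc_parent hanc)
              rwa [← hch, Nat.mul_div_cancel_left m (by omega)] at h2
            rcases hcond with hc | hc
            · rw [hpar] at hc; exact absurd hc (by simp)
            · omega
          have hch2 : ¬(2*m+1 = I/2) := by
            intro hch
            have hpar : isAnc m L = true := by
              have h2 : isAnc (I/2/2) L = true := isAnc_parent (isAnc_parent hanc)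
              rw [← hch] at h2
              rwa [show (2*m+1)/2 = m by omega] at h2
            rcases hcond with hc | hc
            · rw [hpar] at hc; exact absurd hc (by simp)
            · omega
          rw [if_neg hch1, if_neg hch2]
          apply hint m hm1 hmn
          rcases hcond with hc | hc
          · exact Or.inl hc
          · by_cases hmL : isAnc m L = true
            · right
              by_contra hIm
              have hmlt : m < I := by omega
              have hch := isAnc_chain hmL hanc hmlt
              rw [isAnc_of_lt (by omega)] at hch
              exact absurd hch (by simp)
            · exact Or.inl (by simpa using hmL)
    · rw [dif_neg hgt]
      have hi1 : i.toNat = 1 := by omega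
      refine ⟨hlen, hc, hleaf, ?_⟩
      intro m hm1 hmn
      exact hint m hm1 hmn (Or.inr (by omega))

theorem update_good {n : Nat} {tree c : List Int} (hg : goodTree n tree c)
    {x : Int} (hx0 : 0 ≤ x) (hxn : x < (n : Int)) :
    goodTree n (update (n : Int) tree x 1) (c.set x.toNat (c.getD x.toNat 0 + 1)) := by
  obtain ⟨hlt, hlc, hleaf, hint⟩ := hg
  have hn : 1 ≤ n := by omega
  set L := x.toNat + n with hLdef
  have hxL : (x + (n:Int)).toNat = L := by omega
  unfold update
  rw [pyGetD_toNat _ _ (by omega), pySetD_toNat _ _ _ (by omega), hxL]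
  set t0 := tree.set L (tree.getD L 0 + 1) with ht0
  have hget0 : ∀ j : Nat, t0.getD j 0 = if j = L then tree.getD L 0 + 1 else tree.getD j 0 := by
    intro j
    rw [ht0, getD_set]
    by_cases hj : j = L
    · rw [if_pos ⟨hj, by omega⟩, if_pos hj]
    · rw [if_neg (by tauto), if_neg hj]
  apply updLoop_inv (L := L) (by omega) (by omega) hn
    (by rw [List.length_set]; omega) (isAnc_self L) (2*n) _ _ (by omega) (by omega) (by omega)
    (by rw [hxL]; exact isAnc_self L)
    (by rw [ht0, List.length_set]; exact hlt)
  · intro j hj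
    rw [hget0]
    rw [getD_set]
    by_cases hjx : j = x.toNat
    · rw [if_pos (by omega), if_pos (by omega)]
      rw [show L = n + x.toNat by omega, hleaf x.toNat (by omega)]
    · rw [if_neg (by omega), if_neg (by tauto)]
      exact hleaf j hj
  · intro m hm1 hmn hcond
    have hmL : m ≠ L := by omega
    have hch1 : 2*m ≠ L := by
      intro hch
      have hpar : isAnc m L = true := by
        have h2 : isAnc (L/2) L = true := isAnc_parent (isAnc_self L)
        rwa [show L/2 = m by omega] at h2
      rcases hcond with hc | hc
      · rw [hpar] at hc; exact absurd hc (by simp)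
      · omega
    have hch2 : 2*m+1 ≠ L := by
      intro hch
      have hpar : isAnc m L = true := by
        have h2 : isAnc (L/2) L = true := isAnc_parent (isAnc_self L)
        rwa [show L/2 = m by omega] at h2
      rcases hcond with hc | hc
      · rw [hpar] at hc; exact absurd hc (by simp)
      · omega
    rw [hget0, if_neg hmL, hget0, if_neg hch1, hget0, if_neg hch2]
    exact hint m hm1 hmn

theorem qryLoop_eq {n : Nat} {tree c : List Int}
    (htree : ∀ m : Nat, 1 ≤ m → m < 2*n → tree.getD m 0 = Sleaf c n m) :
    ∀ fuel : Nat, ∀ l r res : Int, 1 ≤ l → 0 ≤ r → r < 2*(n:Int) → r ≤ 2*l - 1 →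
    r.toNat < fuel →
    qryLoop tree res l r fuel = res + SI c n l.toNat r.toNat := by
  intro fuel
  induction fuel with
  | zero => intro l r res _ hr0 _ _ hf; omega
  | succ fuel ih =>
    intro l r res hl hr0 hrn hrl hf
    rw [qryLoop]
    by_cases hlr : l ≤ r
    · rw [if_pos hlr]
      have hbl : PySem.Int.band l 1 = l % 2 := int_band_one' l
      have hbr : PySem.Int.band (Int.not r) 1 = (-r-1) % 2 := by rw [int_not_eq, int_band_one']
      set L := l.toNat with hLd
      set R := r.toNat with hRd
      have hvl : PySem.List.pyGetD tree l 0 = Sleaf c n L := by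
        rw [pyGetD_toNat _ _ (by omega)]; exact htree L (by omega) (by omega)
      have hvr : PySem.List.pyGetD tree r 0 = Sleaf c n R := by
        rw [pyGetD_toNat _ _ (by omega)]; exact htree R (by omega) (by omega)
      rw [hbl, hbr, hvl, hvr, int_shiftR1, int_shiftR1]
      rcases Int.emod_two_eq l with hl2 | hl2 <;> rcases Int.emod_two_eq r with hr2 | hr2
      · -- l even, r even : only right endpoint consumed
        rw [if_neg (by omega), if_pos (by omega), if_neg (by omega), if_pos (by omega)]
        rw [ih (l/2) ((r-1)/2) _ (by omega) (by omega) (by omega) (by omega) (by omega)]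
        rw [show (l/2).toNat = L/2 by omega, show ((r-1)/2).toNat = (R-1)/2 by omega]
        have e1 : SI c n L (R-1) = SI c n (L/2) ((R-1)/2) := by
          have hp := SI_pair (c := c) (n := n) (L/2) ((R-1)/2) (by omega) (by omega)
          rwa [show 2*(L/2) = L by omega, show 2*((R-1)/2)+1 = R-1 by omega] at hp
        rw [SI_top (show L ≤ R by omega) (by omega), e1]
        ring
      · -- l even, r odd : nothing consumed
        rw [if_neg (by omega), if_neg (by omega), if_neg (by omega), if_neg (by omega)]
        rw [ih (l/2) (r/2) _ (by omega) (by omega) (by omega) (by omega) (by omega)]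
        rw [show (l/2).toNat = L/2 by omega, show (r/2).toNat = R/2 by omega]
        have e1 : SI c n L R = SI c n (L/2) (R/2) := by
          have hp := SI_pair (c := c) (n := n) (L/2) (R/2) (by omega) (by omega)
          rwa [show 2*(L/2) = L by omega, show 2*(R/2)+1 = R by omega] at hp
        rw [e1]
        ring
      · -- l odd, r even : both consumed
        rw [if_pos (by omega), if_pos (by omega), if_pos (by omega), if_pos (by omega)]
        rw [ih ((l+1)/2) ((r-1)/2) _ (by omega) (by omega) (by omega) (by omega) (by omega)]
        rw [show ((l+1)/2).toNat = (L+1)/2 by omega, show ((r-1)/2).toNat = (R-1)/2 by omega]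
        have e1 : SI c n (L+1) (R-1) = SI c n ((L+1)/2) ((R-1)/2) := by
          have hp := SI_pair (c := c) (n := n) ((L+1)/2) ((R-1)/2) (by omega) (by omega)
          rwa [show 2*((L+1)/2) = L+1 by omega, show 2*((R-1)/2)+1 = R-1 by omega] at hp
        rw [SI_bot (show L ≤ R by omega), SI_top (show L+1 ≤ R by omega) (by omega), e1]
        ring
      · -- l odd, r odd : left consumed
        rw [if_pos (by omega), if_neg (by omega), if_pos (by omega), if_neg (by omega)]
        rw [ih ((l+1)/2) (r/2) _ (by omega) (by omega) (by omega) (by omega) (by omega)]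
        rw [show ((l+1)/2).toNat = (L+1)/2 by omega, show (r/2).toNat = R/2 by omega]
        have e1 : SI c n (L+1) R = SI c n ((L+1)/2) (R/2) := by
          have hp := SI_pair (c := c) (n := n) ((L+1)/2) (R/2) (by omega) (by omega)
          rwa [show 2*((L+1)/2) = L+1 by omega, show 2*(R/2)+1 = R by omega] at hp
        rw [SI_bot (show L ≤ R by omega), e1]
        ring
    · rw [if_neg hlr]
      rw [SI_empty (by omega)]
      ring

theorem query_eq {n : Nat} {tree c : List Int} (hg : goodTree n tree c)
    {x : Int} (hx0 : 0 ≤ x) (hxn : x < (n : Int)) (hn : 1 ≤ n) :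
    query (n : Int) tree x ((n : Int) - 1) = SI c n (x.toNat + n) (2*n - 1) := by
  have htree' : ∀ m : Nat, 1 ≤ m → m < 2*n → tree.getD m 0 = Sleaf c n m :=
    fun m a b => goodTree_getD ⟨hg.1, hg.2.1, hg.2.2.1, hg.2.2.2⟩ a b
  unfold query
  rw [qryLoop_eq htree' _ (x + (n:Int)) (((n:Int)-1) + (n:Int)) 0
    (by omega) (by omega) (by omega) (by omega) (by omega)]
  rw [show (x + (n:Int)).toNat = x.toNat + n by omega,
      show (((n:Int)-1) + (n:Int)).toNat = 2*n-1 by omega]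
  ring

def xOf (row : List Int) : Int := row.getD 0 0

def countsOf (n : Nat) (p : List (List Int)) : List Int :=
  p.foldl (fun c row => c.set (xOf row).toNat (c.getD (xOf row).toNat 0 + 1)) (List.replicate n 0)

theorem countsOf_length (n : Nat) (p : List (List Int)) : (countsOf n p).length = n := by
  unfold countsOf
  have aux : ∀ (q : List (List Int)) (c : List Int),
      (q.foldl (fun c row => c.set (xOf row).toNat (c.getD (xOf row).toNat 0 + 1)) c).length
        = c.length := by
    intro q
    induction q with
    | nil => intro c; rfl
    | cons row q ih => intro c; rw [List.foldl_cons, ih, List.length_set]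
  rw [aux, List.length_replicate]

theorem SI_leaves {c : List Int} {n x : Nat} (hc : c.length = n) (hx : x < n) (hn : 1 ≤ n) :
    SI c n (x + n) (2*n - 1) = ∑ j ∈ Finset.Icc x (n-1), c.getD j 0 := by
  unfold SI
  have hm : Finset.Icc (x+n) (2*n-1) = Finset.map (addLeftEmbedding n) (Finset.Icc x (n-1)) := by
    rw [Finset.map_add_left_Icc]
    congr 1 <;> omega
  rw [hm, Finset.sum_map]
  apply Finset.sum_congr rfl
  intro j hj
  simp only [Finset.mem_Icc] at hj
  rw [addLeftEmbedding_apply, show n + j = (n + j - n) + n by omega, Sleaf_leaf (by omega) (by omega)]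
  congr 1
  omega

theorem countsOf_append (n : Nat) (p : List (List Int)) (row : List Int) :
    countsOf n (p ++ [row]) =
      (countsOf n p).set (xOf row).toNat ((countsOf n p).getD (xOf row).toNat 0 + 1) := by
  unfold countsOf
  rw [List.foldl_append, List.foldl_cons, List.foldl_nil]

theorem sum_Icc_counts {n : Nat} (hn : 1 ≤ n) (p : List (List Int))
    (hp : ∀ row ∈ p, 0 ≤ xOf row ∧ xOf row < (n : Int)) (x : Nat) (hx : x < n) :
    ∑ j ∈ Finset.Icc x (n-1), (countsOf n p).getD j 0 =
      (p.countP (fun row => decide ((x : Int) ≤ xOf row)) : Int) := by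
  induction p using List.reverseRecOn with
  | nil =>
    simp [countsOf]
  | append_singleton p row ih =>
    have hrow := hp row (by simp)
    have hk : (xOf row).toNat < n := by omega
    have hlen : (countsOf n p).length = n := countsOf_length n p
    rw [countsOf_append]
    have hterm : ∀ j ∈ Finset.Icc x (n-1),
        ((countsOf n p).set (xOf row).toNat ((countsOf n p).getD (xOf row).toNat 0 + 1)).getD j 0
          = (countsOf n p).getD j 0 + (if j = (xOf row).toNat then 1 else 0) := by
      intro j hj
      rw [getD_set]
      by_cases hjk : j = (xOf row).toNat
      · rw [if_pos ⟨hjk, by omega⟩, if_pos hjk, hjk]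
      · rw [if_neg (by tauto), if_neg hjk]
        ring
    rw [Finset.sum_congr rfl hterm, Finset.sum_add_distrib,
      ih (fun r hr => hp r (by simp [hr])),
      Finset.sum_ite_eq' (Finset.Icc x (n-1)) ((xOf row).toNat) (fun _ => (1:Int)),
      List.countP_append]
    simp only [Finset.mem_Icc, List.countP_cons, List.countP_nil]
    by_cases hin : (x : Int) ≤ xOf row
    · rw [if_pos (by omega)]
      simp [hin]
    · rw [if_neg (by omega)]
      simp [hin]

def stepA (n : Nat) (pts : List (List Int)) : (List Int × Int) → Int → (List Int × Int) :=
  fun st i =>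
    (update (n:Int) st.1 (PySem.List.pyGetD (PySem.List.pyGetD pts i []) 0 0) 1,
     st.2 + query (n:Int) (update (n:Int) st.1 (PySem.List.pyGetD (PySem.List.pyGetD pts i []) 0 0) 1)
       (PySem.List.pyGetD (PySem.List.pyGetD pts i []) 0 0) ((n:Int)-1) - 1)

def stepB (n : Nat) (pts : List (List Int)) : Int → Int → Int :=
  fun result i =>
    (PySem.List.pyRange 0 i 1).foldl
      (fun r j => if PySem.List.pyGetD (PySem.List.pyGetD pts j []) 0 0 ≥
          PySem.List.pyGetD (PySem.List.pyGetD pts i []) 0 0 then r + 1 else r) result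

def treeInit (n : Nat) : List Int := (PySem.List.pyRange 0 ((n:Int)*2) 1).map (fun _ => (0:Int))

theorem getD_zeros (xs : List α) (j : Nat) : ((xs.map (fun _ => (0:Int))).getD j 0) = 0 := by
  rw [List.getD_eq_getElem?_getD, List.getElem?_map]
  cases xs[j]? <;> simp

theorem treeInit_good (n : Nat) : goodTree n (treeInit n) (List.replicate n 0) := by
  refine ⟨?_, List.length_replicate, ?_, ?_⟩
  · unfold treeInit
    rw [List.length_map, PySem.List.length_pyRange_one]
    omega
  · intro j hj
    unfold treeInit
    rw [getD_zeros, List.getD_replicate]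
    omega
  · intro m hm1 hmn
    unfold treeInit
    rw [getD_zeros, getD_zeros, getD_zeros]
    ring

theorem pyRange_succ (k : Nat) :
    PySem.List.pyRange 0 (((k:Nat)+1 : Nat) : Int) 1 =
      PySem.List.pyRange 0 ((k:Nat) : Int) 1 ++ [((k:Nat) : Int)] := by
  rw [PySem.List.pyRange_one, PySem.List.pyRange_one]
  rw [show ((((k:Nat)+1 : Nat) : Int) - 0).toNat = k + 1 by omega,
      show (((k:Nat) : Int) - 0).toNat = k by omega]
  rw [List.range_succ, List.map_append]
  simp

theorem getD_take (l : List (List Int)) (k j : Nat) (hj : j < k) :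
    (l.take k).getD j [] = l.getD j [] := by
  rw [List.getD_eq_getElem?_getD, List.getD_eq_getElem?_getD, List.getElem?_take]
  simp [hj]

theorem stepB_eq {n : Nat} {pts : List (List Int)} (hlen : pts.length = n)
    (k : Nat) (hk : k ≤ n) (res : Int) :
    stepB n pts res ((k:Nat) : Int) =
      res + ((pts.take k).countP
        (fun row => decide (xOf row ≥ xOf (pts.getD k []))) : Int) := by
  unfold stepB
  have hxi : PySem.List.pyGetD (PySem.List.pyGetD pts ((k:Nat):Int) []) 0 0 = xOf (pts.getD k []) := by
    rw [PySem.List.pyGetD_natCast, PySem.List.pyGetD_zero]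
    rfl
  have hcong : (PySem.List.pyRange 0 ((k:Nat):Int) 1).foldl
      (fun r j => if PySem.List.pyGetD (PySem.List.pyGetD pts j []) 0 0 ≥
        PySem.List.pyGetD (PySem.List.pyGetD pts ((k:Nat):Int) []) 0 0 then r + 1 else r) res
      = (PySem.List.pyRange 0 ((k:Nat):Int) 1).foldl
      (fun r j => if PySem.List.pyGetD (PySem.List.pyGetD (pts.take k) j []) 0 0 ≥
        xOf (pts.getD k []) then r + 1 else r) res := by
    apply PySem.List.foldl_congr_mem
    intro acc j hj
    rw [PySem.List.mem_pyRange_one] at hj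
    rw [hxi, show j = ((j.toNat : Nat) : Int) by omega,
      PySem.List.pyGetD_natCast, PySem.List.pyGetD_natCast,
      getD_take pts k j.toNat (by omega)]
  rw [hcong]
  rw [show ((k:Nat) : Int) = (((pts.take k).length : Nat) : Int) by
      rw [List.length_take]; omega]
  have hfold := PySem.List.foldl_pyRange_pyGetD' (pts.take k) ([] : List Int)
      (fun r row => if PySem.List.pyGetD row 0 0 ≥ xOf (pts.getD k []) then r + 1 else r)
      res (a := 0) (by omega)
  rw [show (0:Int).toNat = 0 by rfl, List.drop_zero] at hfold
  rw [hfold]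
  rw [PySem.List.foldl_ite_add_one
    (p := fun row => PySem.List.pyGetD row 0 0 ≥ xOf (pts.getD k []))]
  congr 2
  apply List.countP_congr
  intro row _
  rw [PySem.List.pyGetD_zero]
  rfl

theorem main_folds {pts : List (List Int)} {n : Nat} (hn : 1 ≤ n) (hlen : pts.length = n)
    (hrows : ∀ row ∈ pts, 0 ≤ xOf row ∧ xOf row < (n : Int)) :
    ∀ k : Nat, k ≤ n →
      goodTree n (((PySem.List.pyRange 0 ((k:Nat) : Int) 1).foldl (stepA n pts) (treeInit n, 0)).1)
        (countsOf n (pts.take k)) ∧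
      ((PySem.List.pyRange 0 ((k:Nat) : Int) 1).foldl (stepA n pts) (treeInit n, 0)).2 =
      (PySem.List.pyRange 0 ((k:Nat) : Int) 1).foldl (stepB n pts) 0 := by
  intro k
  induction k with
  | zero =>
    intro _
    rw [show (((0:Nat)) : Int) = (0:Int) by rfl]
    rw [show PySem.List.pyRange 0 0 1 = [] from rfl]
    constructor
    · simpa [countsOf] using treeInit_good n
    · rfl
  | succ k ih =>
    intro hk1
    obtain ⟨ihg, ihr⟩ := ih (by omega)
    rw [pyRange_succ k, List.foldl_append, List.foldl_append,
      List.foldl_cons, List.foldl_nil, List.foldl_cons, List.foldl_nil]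
    set stk := (PySem.List.pyRange 0 ((k:Nat) : Int) 1).foldl (stepA n pts) (treeInit n, 0) with hstk
    have hx : PySem.List.pyGetD (PySem.List.pyGetD pts ((k:Nat):Int) []) 0 0 = xOf (pts.getD k []) := by
      rw [PySem.List.pyGetD_natCast, PySem.List.pyGetD_zero]
      rfl
    have hmemk : pts.getD k [] ∈ pts := by
      rw [List.getD_eq_getElem?_getD, List.getElem?_eq_getElem (by omega)]
      exact List.getElem_mem _
    have hxb := hrows _ hmemk
    set x : Int := xOf (pts.getD k []) with hxdef
    have htake : pts.take (k+1) = pts.take k ++ [pts.getD k []] := by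
      rw [List.take_succ]
      congr 1
      rw [List.getElem?_eq_getElem (by omega)]
      rw [List.getD_eq_getElem?_getD, List.getElem?_eq_getElem (by omega)]
      rfl
    have hcnew : countsOf n (pts.take (k+1)) =
        (countsOf n (pts.take k)).set x.toNat ((countsOf n (pts.take k)).getD x.toNat 0 + 1) := by
      rw [htake, countsOf_append]
    have hgood' : goodTree n (update (n:Int) stk.1 x 1) (countsOf n (pts.take (k+1))) := by
      rw [hcnew]
      exact update_good ihg (by omega) (by omega)
    constructor
    · show goodTree n (update (n:Int) stk.1 (PySem.List.pyGetD (PySem.List.pyGetD pts ((k:Nat):Int) []) 0 0) 1) _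
      rw [hx]
      exact hgood'
    · show stk.2 + query (n:Int) (update (n:Int) stk.1 (PySem.List.pyGetD (PySem.List.pyGetD pts ((k:Nat):Int) []) 0 0) 1) (PySem.List.pyGetD (PySem.List.pyGetD pts ((k:Nat):Int) []) 0 0) ((n:Int)-1) - 1 = _
      rw [hx]
      rw [query_eq hgood' (by omega) (by omega) hn]
      rw [show x.toNat + n = (x.toNat) + n by rfl]
      rw [SI_leaves (by exact (countsOf_length n _)) (by omega) hn]
      rw [sum_Icc_counts hn (pts.take (k+1))
        (fun r hr => hrows r (List.mem_of_mem_take hr)) x.toNat (by omega)]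
      rw [htake, List.countP_append]
      rw [stepB_eq hlen k (by omega), ihr]
      have hpred : (pts.take k).countP (fun row => decide ((x.toNat : Int) ≤ xOf row)) =
          (pts.take k).countP (fun row => decide (xOf row ≥ x)) := by
        apply List.countP_congr
        intro row _
        have hxx : ((x.toNat : Int)) = x := by omega
        simp [hxx, ge_iff_le]
      have hone : List.countP (fun row => decide ((x.toNat : Int) ≤ xOf row)) [pts.getD k []] = 1 := by
        simp only [List.countP_cons, List.countP_nil]
        rw [if_pos (by rw [decide_eq_true_eq]; omega)]
      rw [hone, hpred]
      push_cast
      ring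

theorem compress_inv {pts : List (List Int)} (v : Int) (hv : 0 ≤ v) :
    ∀ k : Nat, k ≤ pts.length →
      ((((PySem.List.pyRange 0 ((k:Nat) : Int) 1).foldl
        (fun (st : List (List Int) × Int × Int) i =>
          if PySem.List.pyGetD (PySem.List.pyGetD st.1 i []) v 0 == st.2.1 then
            (PySem.List.pySetD st.1 i (PySem.List.pySetD (PySem.List.pyGetD st.1 i []) v st.2.2),
             st.2.1, st.2.2)
          else
            (PySem.List.pySetD st.1 i (PySem.List.pySetD (PySem.List.pyGetD st.1 i []) v (st.2.2 + 1)),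
             PySem.List.pyGetD (PySem.List.pyGetD st.1 i []) v 0, st.2.2 + 1))
        (PySem.List.sorted pts (fun x => PySem.List.pyGetD x v 0) false,
         PySem.List.pyGetD (PySem.List.pyGetD (PySem.List.sorted pts (fun x => PySem.List.pyGetD x v 0) false) 0 []) v 0,
         0)).1.length = pts.length) ∧
      (0 ≤ ((PySem.List.pyRange 0 ((k:Nat) : Int) 1).foldl
        (fun (st : List (List Int) × Int × Int) i =>
          if PySem.List.pyGetD (PySem.List.pyGetD st.1 i []) v 0 == st.2.1 then
            (PySem.List.pySetD st.1 i (PySem.List.pySetD (PySem.List.pyGetD st.1 i []) v st.2.2),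
             st.2.1, st.2.2)
          else
            (PySem.List.pySetD st.1 i (PySem.List.pySetD (PySem.List.pyGetD st.1 i []) v (st.2.2 + 1)),
             PySem.List.pyGetD (PySem.List.pyGetD st.1 i []) v 0, st.2.2 + 1))
        (PySem.List.sorted pts (fun x => PySem.List.pyGetD x v 0) false,
         PySem.List.pyGetD (PySem.List.pyGetD (PySem.List.sorted pts (fun x => PySem.List.pyGetD x v 0) false) 0 []) v 0,
         0)).2.2 ∧
       (((PySem.List.pyRange 0 ((k:Nat) : Int) 1).foldl
        (fun (st : List (List Int) × Int × Int) i =>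
          if PySem.List.pyGetD (PySem.List.pyGetD st.1 i []) v 0 == st.2.1 then
            (PySem.List.pySetD st.1 i (PySem.List.pySetD (PySem.List.pyGetD st.1 i []) v st.2.2),
             st.2.1, st.2.2)
          else
            (PySem.List.pySetD st.1 i (PySem.List.pySetD (PySem.List.pyGetD st.1 i []) v (st.2.2 + 1)),
             PySem.List.pyGetD (PySem.List.pyGetD st.1 i []) v 0, st.2.2 + 1))
        (PySem.List.sorted pts (fun x => PySem.List.pyGetD x v 0) false,
         PySem.List.pyGetD (PySem.List.pyGetD (PySem.List.sorted pts (fun x => PySem.List.pyGetD x v 0) false) 0 []) v 0,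
         0)).2.2 = 0 ∨
        ((PySem.List.pyRange 0 ((k:Nat) : Int) 1).foldl
        (fun (st : List (List Int) × Int × Int) i =>
          if PySem.List.pyGetD (PySem.List.pyGetD st.1 i []) v 0 == st.2.1 then
            (PySem.List.pySetD st.1 i (PySem.List.pySetD (PySem.List.pyGetD st.1 i []) v st.2.2),
             st.2.1, st.2.2)
          else
            (PySem.List.pySetD st.1 i (PySem.List.pySetD (PySem.List.pyGetD st.1 i []) v (st.2.2 + 1)),
             PySem.List.pyGetD (PySem.List.pyGetD st.1 i []) v 0, st.2.2 + 1))
        (PySem.List.sorted pts (fun x => PySem.List.pyGetD x v 0) false,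
         PySem.List.pyGetD (PySem.List.pyGetD (PySem.List.sorted pts (fun x => PySem.List.pyGetD x v 0) false) 0 []) v 0,
         0)).2.2 < (k:Int))) ∧
      (∀ i : Nat, i < k → ∃ row' ∈ pts, ∃ z : Int, 0 ≤ z ∧
        z ≤ ((PySem.List.pyRange 0 ((k:Nat) : Int) 1).foldl
        (fun (st : List (List Int) × Int × Int) i =>
          if PySem.List.pyGetD (PySem.List.pyGetD st.1 i []) v 0 == st.2.1 then
            (PySem.List.pySetD st.1 i (PySem.List.pySetD (PySem.List.pyGetD st.1 i []) v st.2.2),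
             st.2.1, st.2.2)
          else
            (PySem.List.pySetD st.1 i (PySem.List.pySetD (PySem.List.pyGetD st.1 i []) v (st.2.2 + 1)),
             PySem.List.pyGetD (PySem.List.pyGetD st.1 i []) v 0, st.2.2 + 1))
        (PySem.List.sorted pts (fun x => PySem.List.pyGetD x v 0) false,
         PySem.List.pyGetD (PySem.List.pyGetD (PySem.List.sorted pts (fun x => PySem.List.pyGetD x v 0) false) 0 []) v 0,
         0)).2.2 ∧
        ((PySem.List.pyRange 0 ((k:Nat) : Int) 1).foldl
        (fun (st : List (List Int) × Int × Int) i =>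
          if PySem.List.pyGetD (PySem.List.pyGetD st.1 i []) v 0 == st.2.1 then
            (PySem.List.pySetD st.1 i (PySem.List.pySetD (PySem.List.pyGetD st.1 i []) v st.2.2),
             st.2.1, st.2.2)
          else
            (PySem.List.pySetD st.1 i (PySem.List.pySetD (PySem.List.pyGetD st.1 i []) v (st.2.2 + 1)),
             PySem.List.pyGetD (PySem.List.pyGetD st.1 i []) v 0, st.2.2 + 1))
        (PySem.List.sorted pts (fun x => PySem.List.pyGetD x v 0) false,
         PySem.List.pyGetD (PySem.List.pyGetD (PySem.List.sorted pts (fun x => PySem.List.pyGetD x v 0) false) 0 []) v 0,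
         0)).1.getD i [] = PySem.List.pySetD row' v z) ∧
      (∀ i : Nat, k ≤ i →
        ((PySem.List.pyRange 0 ((k:Nat) : Int) 1).foldl
        (fun (st : List (List Int) × Int × Int) i =>
          if PySem.List.pyGetD (PySem.List.pyGetD st.1 i []) v 0 == st.2.1 then
            (PySem.List.pySetD st.1 i (PySem.List.pySetD (PySem.List.pyGetD st.1 i []) v st.2.2),
             st.2.1, st.2.2)
          else
            (PySem.List.pySetD st.1 i (PySem.List.pySetD (PySem.List.pyGetD st.1 i []) v (st.2.2 + 1)),
             PySem.List.pyGetD (PySem.List.pyGetD st.1 i []) v 0, st.2.2 + 1))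
        (PySem.List.sorted pts (fun x => PySem.List.pyGetD x v 0) false,
         PySem.List.pyGetD (PySem.List.pyGetD (PySem.List.sorted pts (fun x => PySem.List.pyGetD x v 0) false) 0 []) v 0,
         0)).1.getD i [] =
        (PySem.List.sorted pts (fun x => PySem.List.pyGetD x v 0) false).getD i [])) := by
  set s := PySem.List.sorted pts (fun x => PySem.List.pyGetD x v 0) false with hs
  have hslen : s.length = pts.length := PySem.List.length_sorted _ _ _
  intro k
  induction k with
  | zero =>
    intro _
    refine ⟨hslen, ⟨by norm_num, by norm_num⟩, fun i hi => by omega, fun i _ => rfl⟩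
  | succ k ih =>
    intro hk1
    obtain ⟨ih1, ⟨ih2, ih3⟩, ih4, ih5⟩ := ih (by omega)
    rw [pyRange_succ k, List.foldl_append, List.foldl_cons, List.foldl_nil]
    set st := (PySem.List.pyRange 0 ((k:Nat) : Int) 1).foldl
        (fun (st : List (List Int) × Int × Int) i =>
          if PySem.List.pyGetD (PySem.List.pyGetD st.1 i []) v 0 == st.2.1 then
            (PySem.List.pySetD st.1 i (PySem.List.pySetD (PySem.List.pyGetD st.1 i []) v st.2.2),
             st.2.1, st.2.2)
          else
            (PySem.List.pySetD st.1 i (PySem.List.pySetD (PySem.List.pyGetD st.1 i []) v (st.2.2 + 1)),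
             PySem.List.pyGetD (PySem.List.pyGetD st.1 i []) v 0, st.2.2 + 1))
        (s, PySem.List.pyGetD (PySem.List.pyGetD s 0 []) v 0, 0) with hstdef
    have hrowk : PySem.List.pyGetD st.1 ((k:Nat):Int) [] = s.getD k [] := by
      rw [PySem.List.pyGetD_natCast]
      exact ih5 k (le_refl k)
    have hmemk : s.getD k [] ∈ pts := by
      rw [← PySem.List.mem_sorted pts (fun x => PySem.List.pyGetD x v 0) false, ← hs]
      rw [List.getD_eq_getElem?_getD, List.getElem?_eq_getElem (by omega)]
      exact List.getElem_mem _
    have hset : ∀ (r : List Int), PySem.List.pySetD st.1 ((k:Nat):Int) r = st.1.set k r := by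
      intro r
      rw [PySem.List.pySetD_of_nonneg st.1 r (by omega), Int.toNat_natCast]
    have hgetDset : ∀ (r : List Int) (i : Nat), (st.1.set k r).getD i [] =
        if i = k ∧ k < pts.length then r else st.1.getD i [] := by
      intro r i
      rw [getD_set', ih1]
    by_cases hcond : (PySem.List.pyGetD (PySem.List.pyGetD st.1 ((k:Nat):Int) []) v 0 == st.2.1) = true
    · rw [if_pos hcond]
      refine ⟨by simp [hset, List.length_set, ih1], ⟨by simpa using ih2, ?_⟩, ?_, ?_⟩
      · show st.2.2 = 0 ∨ st.2.2 < ((k+1 : Nat) : Int)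
        rcases ih3 with h | h
        · left; exact h
        · right; push_cast at h ⊢; omega
      · intro i hi
        simp only [hset, hgetDset]
        rcases Nat.lt_or_ge i k with hik | hik
        · obtain ⟨row', hrow', z, hz0, hz1, hz2⟩ := ih4 i hik
          exact ⟨row', hrow', z, hz0, hz1, by rw [if_neg (by omega)]; exact hz2⟩
        · have hik' : i = k := by omega
          refine ⟨s.getD k [], hmemk, st.2.2, by simpa using ih2, le_refl _, ?_⟩
          rw [if_pos (by omega), hrowk]
      · intro i hi
        simp only [hset, hgetDset]
        rw [if_neg (by omega)]
        exact ih5 i (by omega)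
    · rw [if_neg hcond]
      have hkpos : 1 ≤ k := by
        by_contra hk0
        have hk0' : k = 0 := by omega
        subst hk0'
        have hst0 : st = (s, PySem.List.pyGetD (PySem.List.pyGetD s 0 []) v 0, 0) := by
          rw [hstdef]; rfl
        rw [hst0] at hcond
        simp at hcond
      refine ⟨by simp [hset, List.length_set, ih1], ⟨by show (0:Int) ≤ st.2.2 + 1; omega, ?_⟩, ?_, ?_⟩
      · show st.2.2 + 1 = 0 ∨ st.2.2 + 1 < ((k+1 : Nat) : Int)
        right
        rcases ih3 with h | h
        · push_cast; omega
        · push_cast at h ⊢; omega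
      · intro i hi
        simp only [hset, hgetDset]
        rcases Nat.lt_or_ge i k with hik | hik
        · obtain ⟨row', hrow', z, hz0, hz1, hz2⟩ := ih4 i hik
          exact ⟨row', hrow', z, hz0, by show z ≤ st.2.2 + 1; omega, by rw [if_neg (by omega)]; exact hz2⟩
        · have hik' : i = k := by omega
          refine ⟨s.getD k [], hmemk, st.2.2 + 1, by show (0:Int) ≤ st.2.2 + 1; omega, le_refl _, ?_⟩
          rw [if_pos (by omega), hrowk]
      · intro i hi
        simp only [hset, hgetDset]
        rw [if_neg (by omega)]
        exact ih5 i (by omega)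

theorem compress_length (pts : List (List Int)) (v : Int) (hv : 0 ≤ v) :
    (compress ((pts.length : Nat) : Int) pts v).length = pts.length := by
  unfold compress
  exact (compress_inv v hv pts.length (le_refl _)).1

theorem compress_mem {pts : List (List Int)} {v : Int} (hv : 0 ≤ v) :
    ∀ row ∈ compress ((pts.length : Nat) : Int) pts v, ∃ row' ∈ pts, ∃ z : Int,
      0 ≤ z ∧ z < (pts.length : Int) ∧ row = PySem.List.pySetD row' v z := by
  intro row hrow
  obtain ⟨h1, ⟨h2, h3⟩, h4, h5⟩ := compress_inv (pts := pts) v hv pts.length (le_refl _)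
  unfold compress at hrow
  obtain ⟨i, hi, hieq⟩ := List.mem_iff_getElem.mp hrow
  rw [h1] at hi
  obtain ⟨row', hrow', z, hz0, hz1, hz2⟩ := h4 i hi
  refine ⟨row', hrow', z, hz0, by omega, ?_⟩
  rw [← hieq]
  rw [← hz2]
  rw [List.getD_eq_getElem?_getD, List.getElem?_eq_getElem (by rw [h1]; omega)]
  rfl

theorem solve_eq_alt : ∀ (N : Int) (point : List (List Int)),
    (N = (point.length : Int) ∧ point ≠ [] ∧ ∀ row ∈ point, 2 ≤ row.length) →
    solve N point = solve_alt N point := by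
  intro N point hpre
  obtain ⟨hN, hne, hrowlen⟩ := hpre
  have hn1 : 0 < point.length := List.length_pos_of_ne_nil hne
  subst hN
  have hm1 := compress_mem (pts := point) (v := 0) (by norm_num)
  have hl1 : (compress ((point.length : Nat) : Int) point 0).length = point.length :=
    compress_length point 0 (by norm_num)
  set s1 := compress ((point.length : Nat) : Int) point 0 with hs1def
  have e : ((s1.length : Nat) : Int) = ((point.length : Nat) : Int) := by rw [hl1]
  have hm2 := compress_mem (pts := s1) (v := 1) (by norm_num)
  rw [e] at hm2
  have hl2 : (compress ((point.length : Nat) : Int) s1 1).length = point.length := by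
    rw [← e, compress_length s1 1 (by norm_num), hl1]
  set s2 := compress ((point.length : Nat) : Int) s1 1 with hs2def
  set pts := PySem.List.sorted2 s2 (fun x => PySem.List.pyGetD x 1 0)
      (fun x => -(PySem.List.pyGetD x 0 0)) false with hptsdef
  have hplen : pts.length = point.length := by
    rw [hptsdef, (PySem.List.sorted2_perm s2 _ _ false).length_eq, hl2]
  have hrows : ∀ row ∈ pts, 0 ≤ xOf row ∧ xOf row < ((point.length : Nat) : Int) := by
    intro row hr
    have hr2 : row ∈ s2 := ((PySem.List.sorted2_perm s2 _ _ false).mem_iff).mp hr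
    obtain ⟨r1, hr1, z1, hz10, hz11, hz1e⟩ := hm2 row hr2
    obtain ⟨r0, hr0, z0, hz00, hz01, hz0e⟩ := hm1 r1 hr1
    have e1 : xOf row = xOf r1 := by
      rw [hz1e, PySem.List.pySetD_of_nonneg r1 z1 (by omega)]
      unfold xOf
      rw [show (1:Int).toNat = 1 from rfl, getD_set']
      rw [if_neg (by omega)]
    have e0 : xOf r1 = z0 := by
      rw [hz0e, PySem.List.pySetD_of_nonneg r0 z0 (by omega)]
      unfold xOf
      rw [show (0:Int).toNat = 0 from rfl, getD_set']
      rw [if_pos ⟨rfl, by have := hrowlen r0 hr0; omega⟩]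
    rw [e1, e0]
    exact ⟨hz00, hz01⟩
  exact (main_folds (n := point.length) (by omega) hplen hrows point.length (le_refl _)).2

theorem solve_eq_alt_nonpos (N : Int) (point : List (List Int)) (hN : N ≤ 0) :
    solve N point = solve_alt N point := by
  unfold solve solve_alt
  have h : PySem.List.pyRange 0 N 1 = [] := by
    rw [PySem.List.pyRange_one, show (N - 0).toNat = 0 by omega]
    rfl
  simp only [h, List.foldl_nil]

-- ===== VERDICT (by name: the statement is the Claim_ definition above) =====
theorem solve_spec : Claim_equal_solve := by
  intro N point _ hpre
  obtain ⟨hN, hne, hrows⟩ := hpre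
  show solve N point = solve_alt N point
  rcases hN with hN | hN
  · exact solve_eq_alt N point ⟨hN, hne, hrows⟩
  · exact solve_eq_alt_nonpos N point hN
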